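-- pv_equiv track=rewrite | github.com/Smalli68/Task4.1 | q29.py | count_specific_items
-- ===== SOURCE A (Python) =====
-- def count_specific_items(t1, t2, target_values):
--   """
--   Counts the total number of items in two tables (lists/tuples) that match
--   any of the specified target values.
--
--   Args:
--     t1: The first table (list or tuple).
--     t2: The second table (list or tuple).
--     target_values: A list or tuple of values to count.
--
--   Returns:
--     The total count of matching items across both tables.
--   """
--   count = 0
--   for item in t1:
--     if item in target_values:
--       count += 1
--   for item in t2:
--     if item in target_values:
--       count += 1
--   return count
-- ===== SOURCE B (Python) =====
-- def count_specific_items(t1, t2, target_values):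
--   # Build one frequency table of both tables, then sum the tallies of the
--   # distinct targets -- loops over deduped targets instead of testing
--   # membership per item.
--   counts = {}
--   for item in t1:
--     counts[item] = counts.get(item, 0) + 1
--   for item in t2:
--     counts[item] = counts.get(item, 0) + 1
--   return sum(counts.get(v, 0) for v in set(target_values))
-- ===== Notes on version B (the rewrite author's own statement) =====
-- stated objective: faster
-- what changed: B builds one hash-map frequency table of both tables and sums the tallies of the deduplicated target values, replacing A's per-item linear membership scan of target_values.
import Mathlib
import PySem

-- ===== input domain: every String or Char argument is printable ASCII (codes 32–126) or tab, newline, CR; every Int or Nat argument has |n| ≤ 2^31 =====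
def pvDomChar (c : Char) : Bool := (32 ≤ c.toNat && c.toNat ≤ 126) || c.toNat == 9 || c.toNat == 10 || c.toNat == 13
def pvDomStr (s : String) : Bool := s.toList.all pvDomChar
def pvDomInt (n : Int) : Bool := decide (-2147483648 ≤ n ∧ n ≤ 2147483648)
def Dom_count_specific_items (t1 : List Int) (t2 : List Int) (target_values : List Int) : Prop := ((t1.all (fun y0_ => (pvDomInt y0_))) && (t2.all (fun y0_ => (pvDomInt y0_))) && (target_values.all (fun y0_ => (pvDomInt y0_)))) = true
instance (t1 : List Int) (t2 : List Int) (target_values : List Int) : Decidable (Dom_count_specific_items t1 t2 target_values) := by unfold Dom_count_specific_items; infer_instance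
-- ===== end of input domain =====

-- B replaces A's per-item membership scan of target_values by one frequency table plus a sum over the deduped targets (measured faster).


-- ===== PORT A =====
-- A: scan each table, incrementing a counter when the item occurs in target_values.
def count_specific_items (t1 : List Int) (t2 : List Int) (target_values : List Int) : Int :=
  let count : Int := 0
  let count := t1.foldl (fun count item => if item ∈ target_values then count + 1 else count) count
  let count := t2.foldl (fun count item => if item ∈ target_values then count + 1 else count) count
  count

-- ===== PORT B =====
-- B: one frequency table of both tables, then sum the tallies of the deduped targets.
def count_specific_items_alt (t1 : List Int) (t2 : List Int) (target_values : List Int) : Int :=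
  let counts : PySem.Dict Int Int := PySem.Dict.empty
  let counts := t1.foldl (fun counts item => counts.insert item (counts.getD item 0 + 1)) counts
  let counts := t2.foldl (fun counts item => counts.insert item (counts.getD item 0 + 1)) counts
  ((PySem.Set.ofList target_values).map (fun v => counts.getD v 0)).sum

-- ===== PRECONDITION & SPEC =====
def Spec_count_specific_items (t1 : List Int) (t2 : List Int) (target_values : List Int) (out : Int) : Prop := out = count_specific_items_alt t1 t2 target_values
instance (t1 : List Int) (t2 : List Int) (target_values : List Int) (out : Int) : Decidable (Spec_count_specific_items t1 t2 target_values out) := by unfold Spec_count_specific_items; infer_instance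

-- ===== CLAIM (what is proved, stated in full; the proofs are below) =====
def Claim_equal_count_specific_items : Prop := ∀ (t1 : List Int) (t2 : List Int) (target_values : List Int), Dom_count_specific_items t1 t2 target_values → Spec_count_specific_items t1 t2 target_values (count_specific_items t1 t2 target_values)

-- ===== LEMMAS AND PROOFS =====
lemma sum_indicator_int (x : Int) (S : List Int) (hS : S.Nodup) :
    (S.map (fun v => if x = v then (1 : Int) else 0)).sum = if x ∈ S then 1 else 0 := by
  induction S with
  | nil => simp
  | cons a S ih =>
      rcases List.nodup_cons.mp hS with ⟨ha, hS'⟩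
      by_cases h : x = a
      · subst h; simp [ih hS', ha]
      · simp [h, ih hS']

lemma sum_count_nodup (xs S : List Int) (hS : S.Nodup) :
    (S.map (fun v => (xs.count v : Int))).sum = (xs.countP (fun x => decide (x ∈ S)) : Int) := by
  induction xs with
  | nil => simp
  | cons x xs ih =>
      have : (S.map (fun v => ((x :: xs).count v : Int))).sum
          = (S.map (fun v => (xs.count v : Int))).sum
            + (S.map (fun v => if x = v then (1 : Int) else 0)).sum := by
        rw [← List.sum_map_add]
        refine congrArg List.sum (List.map_congr_left ?_)
        intro v _
        rw [List.count_cons]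
        by_cases h : x = v <;> simp [h]
      rw [this, ih, sum_indicator_int x S hS, List.countP_cons]
      by_cases h : x ∈ S <;> simp [h]

-- ===== VERDICT (by name: the statement is the Claim_ definition above) =====
theorem count_specific_items_spec : Claim_equal_count_specific_items := by
  intro t1 t2 tv _
  unfold Spec_count_specific_items count_specific_items count_specific_items_alt
  simp only [PySem.Dict.getD_foldl_insert_add_one, PySem.Dict.getD_empty,
    PySem.List.foldl_ite_add_one]
  have hmap : ((PySem.Set.ofList tv).map
      (fun v => (0 : Int) + (t1.count v : Int) + (t2.count v : Int)))
      = ((PySem.Set.ofList tv).map (fun v => ((t1 ++ t2).count v : Int))) := by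
    refine List.map_congr_left ?_
    intro v _
    simp [List.count_append]
  rw [hmap, sum_count_nodup (t1 ++ t2) _ (PySem.Set.nodup_ofList tv)]
  have hc : (t1 ++ t2).countP (fun x => decide (x ∈ PySem.Set.ofList tv))
      = (t1 ++ t2).countP (fun x => decide (x ∈ tv)) := by
    refine List.countP_congr ?_
    intro x _
    simp [PySem.Set.mem_ofList]
  rw [hc, List.countP_append]
  push_cast
  ring
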